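-- pv_equiv track=rewrite | github.com/nyxssmith/jenkinsTests | fontio3/build/lib.linux-x86_64-3.6/fontio3/opentype/device.py | _packDevice
-- ===== SOURCE A (Python) =====
-- def _packDevice(v):
--     """
--     Takes a list of values and returns a list of packed equivalents, along with
--     the chunkSize that was used.
--     """
--
--     lo, hi = min(v), max(v)
--     count = len(v)
--     retVal = []
--
--     if lo >= -2 and hi <= 1:
--         chunkSize = 2
--     elif lo >= -8 and hi <= 7:
--         chunkSize = 4
--     elif lo >= -128 and hi <= 127:
--         chunkSize = 8
--     else:
--         raise ValueError("Value outside -128..+127 valid range!")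
--
--     # I started out combining the logic of the following three parts, but the
--     # result was a lot less clear, so I'm leaving it as is
--
--     if chunkSize == 2:
--         z = [2, 3, 0, 1]
--         v += ([0] * 7)
--         chunks = (count + 7) // 8
--
--         for i in range(chunks):
--             piece = v[i * 8 : (i + 1) * 8]
--
--             retVal.append(
--               sum(
--                 z[x + 2] << (14 - 2 * i)
--                 for i, x in enumerate(piece)))
--
--     elif chunkSize == 4:
--         z = list(range(8, 16)) + list(range(0, 8))
--         v += ([0] * 3)
--         chunks = (count + 3) // 4
--
--         for i in range(chunks):
--             piece = v[i * 4 : (i + 1) * 4]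
--
--             retVal.append(
--               sum(
--                 z[x + 8] << (12 - 4 * i)
--                 for i, x in enumerate(piece)))
--
--     else:
--         z = list(range(128, 256)) + list(range(0, 128))
--         v += [0]
--         chunks = (count + 1) // 2
--
--         for i in range(chunks):
--             piece = v[i * 2 : (i + 1) * 2]
--
--             retVal.append(
--               sum(
--                 z[x + 128] << (8 - 8 * i)
--                 for i, x in enumerate(piece)))
--
--     return retVal, chunkSize
-- ===== SOURCE B (Python) =====
-- def _packDevice(v):
--     """
--     Same result as A; accumulate all padded values into one big integer,
--     then slice out the 16-bit words. Mutates v (pads with zeros) like A.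
--     """
--     lo, hi = min(v), max(v)
--     count = len(v)
--
--     if lo >= -2 and hi <= 1:
--         chunkSize = 2
--     elif lo >= -8 and hi <= 7:
--         chunkSize = 4
--     elif lo >= -128 and hi <= 127:
--         chunkSize = 8
--     else:
--         raise ValueError("Value outside -128..+127 valid range!")
--
--     ipw = 16 // chunkSize            # items per 16-bit word
--     base = 1 << chunkSize
--     v += [0] * (ipw - 1)             # same padding (in place) as A
--     chunks = (count + ipw - 1) // ipw
--
--     total = 0
--     for x in v[:chunks * ipw]:
--         total = total * base + x % base
--
--     retVal = [(total // (1 << (16 * (chunks - 1 - i)))) % 65536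
--               for i in range(chunks)]
--     return retVal, chunkSize
-- ===== Notes on version B (the rewrite author's own statement) =====
-- stated objective: alternative
-- what changed: Instead of A's per-word slice-and-sum with a z translation table, B packs all (padded) values into one big integer by a single Horner accumulation (total = total*base + x%base) and then extracts each 16-bit word by shifting/masking the big integer; same chunkSize selection and the same in-place zero padding of v.
-- outside the precondition, e.g. on _packDevice([]): A raises ValueError, B raises ValueError
import Mathlib
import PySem

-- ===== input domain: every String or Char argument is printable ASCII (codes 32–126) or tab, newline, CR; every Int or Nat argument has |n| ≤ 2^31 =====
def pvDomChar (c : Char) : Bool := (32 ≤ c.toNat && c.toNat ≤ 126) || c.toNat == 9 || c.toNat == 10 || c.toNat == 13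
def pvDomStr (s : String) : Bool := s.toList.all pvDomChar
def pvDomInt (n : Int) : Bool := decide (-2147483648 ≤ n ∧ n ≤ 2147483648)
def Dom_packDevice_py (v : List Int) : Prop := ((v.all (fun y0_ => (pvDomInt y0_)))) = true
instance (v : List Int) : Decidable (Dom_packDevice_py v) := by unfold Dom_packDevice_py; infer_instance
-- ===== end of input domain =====

-- B packs all values into ONE big integer by Horner accumulation and then slices out the
-- 16-bit words, instead of A's per-word slice-and-sum with a z-translation table; same
-- return value; both mutate the Python argument identically (zero padding); 'alternative'.

-- ===== PORT A =====
def packDevice_py (v : List Int) : List Int × Int :=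
  match PySem.List.min? v (fun x => x), PySem.List.max? v (fun x => x) with
  | some lo, some hi =>
    let count : Int := v.length
    -- the if/elif chain selecting chunkSize; none = the ValueError branch
    match (if lo ≥ -2 ∧ hi ≤ 1 then some (2 : Int)
           else if lo ≥ -8 ∧ hi ≤ 7 then some 4
           else if lo ≥ -128 ∧ hi ≤ 127 then some 8
           else none) with
    | none => ([], 0)
    | some chunkSize =>
      -- z[x + off]: inside Pre_ the index is always in range, so the getD 0 default
      -- (Python's IndexError) is never taken
      if chunkSize == 2 then
        let z : List Int := [2, 3, 0, 1]
        let v2 := v ++ List.replicate 7 (0 : Int)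
        let chunks := PySem.Int.floordiv (count + 7) 8
        let retVal := (PySem.List.pyRange 0 chunks 1).foldl (fun acc i =>
          let piece := PySem.List.slice v2 (some (i * 8)) (some ((i + 1) * 8))
          acc ++ [((PySem.List.enumerate piece 0).map
            (fun p => ((PySem.List.pyGet? z (p.2 + 2)).getD 0) <<< (14 - 2 * p.1).toNat)).sum]) []
        (retVal, 2)
      else if chunkSize == 4 then
        let z : List Int := PySem.List.pyRange 8 16 1 ++ PySem.List.pyRange 0 8 1
        let v2 := v ++ List.replicate 3 (0 : Int)
        let chunks := PySem.Int.floordiv (count + 3) 4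
        let retVal := (PySem.List.pyRange 0 chunks 1).foldl (fun acc i =>
          let piece := PySem.List.slice v2 (some (i * 4)) (some ((i + 1) * 4))
          acc ++ [((PySem.List.enumerate piece 0).map
            (fun p => ((PySem.List.pyGet? z (p.2 + 8)).getD 0) <<< (12 - 4 * p.1).toNat)).sum]) []
        (retVal, 4)
      else
        let z : List Int := PySem.List.pyRange 128 256 1 ++ PySem.List.pyRange 0 128 1
        let v2 := v ++ [(0 : Int)]
        let chunks := PySem.Int.floordiv (count + 1) 2
        let retVal := (PySem.List.pyRange 0 chunks 1).foldl (fun acc i =>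
          let piece := PySem.List.slice v2 (some (i * 2)) (some ((i + 1) * 2))
          acc ++ [((PySem.List.enumerate piece 0).map
            (fun p => ((PySem.List.pyGet? z (p.2 + 128)).getD 0) <<< (8 - 8 * p.1).toNat)).sum]) []
        (retVal, 8)
  | _, _ => ([], 0)

-- ===== PORT B =====
-- the single packing path of Source B after chunkSize has been chosen
def packAlt (chunkSize : Int) (v : List Int) (count : Int) : List Int × Int :=
  let ipw := PySem.Int.floordiv 16 chunkSize
  let base := (1 : Int) <<< chunkSize.toNat   -- chunkSize is 2/4/8 here, so toNat is exact
  let v2 := v ++ List.replicate (ipw - 1).toNat (0 : Int)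
  let chunks := PySem.Int.floordiv (count + ipw - 1) ipw
  let total := (PySem.List.slice v2 none (some (chunks * ipw))).foldl
      (fun t x => t * base + PySem.Int.mod x base) 0
  let retVal := (PySem.List.pyRange 0 chunks 1).map
      (fun i => PySem.Int.mod
        (PySem.Int.floordiv total ((1 : Int) <<< (16 * (chunks - 1 - i)).toNat)) 65536)
  (retVal, chunkSize)

def packDevice_py_alt (v : List Int) : List Int × Int :=
  match PySem.List.min? v (fun x => x) with
  | none => ([], 0)
  | some lo =>
    match PySem.List.max? v (fun x => x) with
    | none => ([], 0)
    | some hi =>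
      let count : Int := v.length
      if lo ≥ -2 ∧ hi ≤ 1 then packAlt 2 v count
      else if lo ≥ -8 ∧ hi ≤ 7 then packAlt 4 v count
      else if lo ≥ -128 ∧ hi ≤ 127 then packAlt 8 v count
      else ([], 0)   -- the ValueError branch

-- ===== PRECONDITION & SPEC =====
-- A raises ValueError on the empty list (min([])) and on any value outside -128..127;
-- Pre_ excludes exactly those inputs.
def Pre_packDevice_py (v : List Int) : Prop :=
  v ≠ [] ∧ ∀ x ∈ v, -128 ≤ x ∧ x ≤ 127
instance (v : List Int) : Decidable (Pre_packDevice_py v) := by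
  unfold Pre_packDevice_py; infer_instance
def pvWitness_packDevice_py : List Int := [1, 0, -2]

def Spec_packDevice_py (v : List Int) (out : List Int × Int) : Prop := out = packDevice_py_alt v
instance (v : List Int) (out : List Int × Int) : Decidable (Spec_packDevice_py v out) := by
  unfold Spec_packDevice_py; infer_instance

-- ===== CLAIM (what is proved, stated in full; the proofs are below) =====
def Claim_equal_packDevice_py : Prop :=
  ∀ (v : List Int), Dom_packDevice_py v → Pre_packDevice_py v →
    Spec_packDevice_py v (packDevice_py v)

-- ===== LEMMAS AND PROOFS =====

def horn (m : Int) (g : Int → Int) (ds : List Int) : Int :=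
  ds.foldl (fun t x => t * m + g x) 0

def wordsF (m : Int) (ipw : Nat) (p : List Int) (c : Nat) : List Int :=
  (List.range c).map (fun k => horn m (fun x => x.emod m) ((p.drop (k * ipw)).take ipw))

lemma horn_shift (m : Int) (g : Int → Int) (ds : List Int) : ∀ (t : Int),
    ds.foldl (fun a x => a * m + g x) t = t * m ^ ds.length + horn m g ds := by
  induction ds with
  | nil => intro t; simp [horn]
  | cons x ds ih =>
    intro t
    simp only [List.foldl_cons, List.length_cons, horn] at *
    rw [ih (t * m + g x), ih (0 * m + g x)]
    ring

lemma horn_cons (m : Int) (g : Int → Int) (x : Int) (ds : List Int) :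
    horn m g (x :: ds) = g x * m ^ ds.length + horn m g ds := by
  show List.foldl (fun a y => a * m + g y) (0 * m + g x) ds = _
  rw [horn_shift m g ds]; ring

lemma horn_bounds (m : Int) (hm : 0 < m) (g : Int → Int) (ds : List Int)
    (hg : ∀ x ∈ ds, 0 ≤ g x ∧ g x < m) :
    0 ≤ horn m g ds ∧ horn m g ds < m ^ ds.length := by
  induction ds with
  | nil => simp [horn]
  | cons x ds ih =>
    obtain ⟨ih0, ih1⟩ := ih (fun y hy => hg y (List.mem_cons_of_mem _ hy))
    obtain ⟨hx0, hx1⟩ := hg x List.mem_cons_self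
    have hp : (0:Int) < m ^ ds.length := pow_pos hm _
    have hmul : g x * m ^ ds.length ≤ (m - 1) * m ^ ds.length :=
      mul_le_mul_of_nonneg_right (by omega) hp.le
    rw [List.length_cons, horn_cons, pow_succ]
    constructor
    · nlinarith
    · nlinarith

lemma horn_extract (M : Int) (hM : 0 < M) : ∀ (ws : List Int),
    (∀ w ∈ ws, 0 ≤ w ∧ w < M) → ∀ k, k < ws.length →
    (horn M (fun w => w) ws) / M ^ (ws.length - 1 - k) % M = ws.getD k 0 := by
  intro ws
  induction ws with
  | nil => intro _ k hk; simp at hk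
  | cons w t ih =>
    intro hb k hk
    obtain ⟨hw0, hw1⟩ := hb w List.mem_cons_self
    have hbt : ∀ x ∈ t, 0 ≤ x ∧ x < M := fun y hy => hb y (List.mem_cons_of_mem _ hy)
    have hS := horn_bounds M hM (fun w => w) t hbt
    cases k with
    | zero =>
      rw [List.getD_cons_zero, horn_cons,
          show (w :: t).length - 1 - 0 = t.length by simp, add_comm]
      rw [Int.add_mul_ediv_right _ _ (by positivity : (M:Int) ^ t.length ≠ 0)]
      rw [Int.ediv_eq_zero_of_lt hS.1 hS.2]
      simpa using Int.emod_eq_of_lt hw0 hw1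
    | succ k =>
      have hk' : k < t.length := by simpa using hk
      rw [List.getD_cons_succ, horn_cons,
          show (w :: t).length - 1 - (k + 1) = t.length - 1 - k by simp; omega]
      have hsplit : (M:Int) ^ t.length = M ^ (k + 1) * M ^ (t.length - 1 - k) := by
        rw [← pow_add]; congr 1; omega
      rw [hsplit, show w * (M ^ (k+1) * M ^ (t.length - 1 - k))
            = w * M ^ (k+1) * M ^ (t.length - 1 - k) by ring, add_comm]
      rw [Int.add_mul_ediv_right _ _ (by positivity : (M:Int) ^ (t.length - 1 - k) ≠ 0)]
      rw [pow_succ, ← mul_assoc, Int.add_mul_emod_self_right]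
      exact ih hbt k hk'

lemma core_chunks (m : Int) (_hm : 1 ≤ m) (ipw : Nat) (p : List Int) :
    ∀ (c : Nat), c * ipw ≤ p.length →
    horn m (fun x => x.emod m) (p.take (c * ipw)) = horn (m ^ ipw) (fun w => w) (wordsF m ipw p c) := by
  intro c
  induction c with
  | zero => intro _; simp [horn, wordsF]
  | succ c ih =>
    intro hlen
    have hlc : c * ipw ≤ p.length := by
      have := Nat.succ_mul c ipw ▸ hlen; omega
    have htake : p.take ((c + 1) * ipw) = p.take (c * ipw) ++ ((p.drop (c * ipw)).take ipw) := by
      rw [Nat.succ_mul, List.take_add]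
    have hpl : ((p.drop (c * ipw)).take ipw).length = ipw := by
      rw [List.length_take, List.length_drop]
      have := Nat.succ_mul c ipw ▸ hlen; omega
    have hws : wordsF m ipw p (c + 1)
        = wordsF m ipw p c ++ [horn m (fun x => x.emod m) ((p.drop (c * ipw)).take ipw)] := by
      simp [wordsF, List.range_succ]
    rw [htake, hws]
    show List.foldl (fun t x => t * m + x.emod m) 0 (p.take (c * ipw) ++ (p.drop (c * ipw)).take ipw) = _
    rw [List.foldl_append]
    rw [horn_shift m (fun x => x.emod m) ((p.drop (c * ipw)).take ipw), hpl]
    show _ = List.foldl (fun t w => t * m ^ ipw + w) 0 (wordsF m ipw p c ++ [_])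
    rw [List.foldl_append]
    simp only [List.foldl_cons, List.foldl_nil]
    have hih := ih hlc
    simp only [horn] at hih
    rw [hih]


lemma zval_gen (half m x : Int) (hm : m = 2 * half) (h0 : 0 < half)
    (h1 : -half ≤ x) (h2 : x ≤ half - 1) :
    ((PySem.List.pyGet? (PySem.List.pyRange half m 1 ++ PySem.List.pyRange 0 half 1) (x + half)).getD 0)
      = x.emod m := by
  have hi0 : 0 ≤ x + half := by omega
  have hlen1 : (PySem.List.pyRange half m 1).length = half.toNat := by
    rw [PySem.List.length_pyRange_one]; congr 1; omega
  rw [PySem.List.pyGet?_of_nonneg _ hi0]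
  by_cases hx : x < 0
  · rw [List.getElem?_append_left (by omega : (x + half).toNat < (PySem.List.pyRange half m 1).length)]
    rw [List.getElem?_eq_getElem (by omega : (x + half).toNat < (PySem.List.pyRange half m 1).length)]
    rw [PySem.List.getElem_pyRange_one]
    have he : x.emod m = x + m := by
      have h1' := Int.add_mul_emod_self_left x m 1
      have h2' : (x + m) % m = x + m := Int.emod_eq_of_lt (by omega) (by omega)
      show x % m = x + m
      calc x % m = (x + m - m) % m := by ring_nf
        _ = (x + m) % m := Int.sub_emod_right _ _
        _ = x + m := h2'
    simp only [Option.getD_some, he]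
    omega
  · have hge : (PySem.List.pyRange half m 1).length ≤ (x + half).toNat := by omega
    rw [List.getElem?_append_right hge]
    rw [List.getElem?_eq_getElem (by rw [hlen1, PySem.List.length_pyRange_one]; omega)]
    rw [PySem.List.getElem_pyRange_one]
    have he : x.emod m = x := Int.emod_eq_of_lt (by omega) (by omega)
    simp only [Option.getD_some, he, hlen1]
    omega

lemma piece2 (l : List Int) (hl : l.length = 8) (hr : ∀ x ∈ l, -2 ≤ x ∧ x ≤ 1) :
    ((PySem.List.enumerate l 0).map
      (fun p => ((PySem.List.pyGet? ([2, 3, 0, 1] : List Int) (p.2 + 2)).getD 0) <<< (14 - 2 * p.1).toNat)).sum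
    = horn 4 (fun x => x.emod 4) l := by
  have hz : ([2, 3, 0, 1] : List Int) = PySem.List.pyRange 2 4 1 ++ PySem.List.pyRange 0 2 1 := by decide
  rcases l with _ | ⟨x0, _ | ⟨x1, _ | ⟨x2, _ | ⟨x3, _ | ⟨x4, _ | ⟨x5, _ | ⟨x6, _ | ⟨x7, rest⟩⟩⟩⟩⟩⟩⟩⟩ <;>
    simp only [List.length_cons, List.length_nil] at hl <;> try omega
  have hrest : rest = [] := by
    have : rest.length = 0 := by omega
    simpa using this
  subst hrest
  have hv : ∀ x ∈ [x0, x1, x2, x3, x4, x5, x6, x7],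
      ((PySem.List.pyGet? [2, 3, 0, 1] (x + 2)).getD 0) = x.emod 4 := by
    intro x hx
    rw [hz]
    have := hr x hx
    exact zval_gen 2 4 x (by norm_num) (by norm_num) (by omega) (by omega)
  simp only [PySem.List.enumerate_cons, PySem.List.enumerate_nil, List.map_cons, List.map_nil,
    List.sum_cons, List.sum_nil]
  rw [hv x0 (by simp), hv x1 (by simp), hv x2 (by simp), hv x3 (by simp),
      hv x4 (by simp), hv x5 (by simp), hv x6 (by simp), hv x7 (by simp)]
  simp only [horn, List.foldl_cons, List.foldl_nil]
  simp only [show ((14:Int) - 2 * (0)).toNat = 14 from rfl,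
      show ((14:Int) - 2 * (0 + 1)).toNat = 12 from rfl,
      show ((14:Int) - 2 * (0 + 1 + 1)).toNat = 10 from rfl,
      show ((14:Int) - 2 * (0 + 1 + 1 + 1)).toNat = 8 from rfl,
      show ((14:Int) - 2 * (0 + 1 + 1 + 1 + 1)).toNat = 6 from rfl,
      show ((14:Int) - 2 * (0 + 1 + 1 + 1 + 1 + 1)).toNat = 4 from rfl,
      show ((14:Int) - 2 * (0 + 1 + 1 + 1 + 1 + 1 + 1)).toNat = 2 from rfl,
      show ((14:Int) - 2 * (0 + 1 + 1 + 1 + 1 + 1 + 1 + 1)).toNat = 0 from rfl]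
  simp only [Int.shiftLeft_natCast_right, Int.shiftLeft_eq]
  norm_num
  ring

lemma piece4 (l : List Int) (hl : l.length = 4) (hr : ∀ x ∈ l, -8 ≤ x ∧ x ≤ 7) :
    ((PySem.List.enumerate l 0).map
      (fun p => ((PySem.List.pyGet? (PySem.List.pyRange 8 16 1 ++ PySem.List.pyRange 0 8 1) (p.2 + 8)).getD 0)
        <<< (12 - 4 * p.1).toNat)).sum
    = horn 16 (fun x => x.emod 16) l := by
  rcases l with _ | ⟨x0, _ | ⟨x1, _ | ⟨x2, _ | ⟨x3, rest⟩⟩⟩⟩ <;>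
    simp only [List.length_cons, List.length_nil] at hl <;> try omega
  have hrest : rest = [] := by
    have : rest.length = 0 := by omega
    simpa using this
  subst hrest
  have hv : ∀ x ∈ [x0, x1, x2, x3],
      ((PySem.List.pyGet? (PySem.List.pyRange 8 16 1 ++ PySem.List.pyRange 0 8 1) (x + 8)).getD 0) = x.emod 16 := by
    intro x hx
    have := hr x hx
    exact zval_gen 8 16 x (by norm_num) (by norm_num) (by omega) (by omega)
  simp only [PySem.List.enumerate_cons, PySem.List.enumerate_nil, List.map_cons, List.map_nil,
    List.sum_cons, List.sum_nil]
  rw [hv x0 (by simp), hv x1 (by simp), hv x2 (by simp), hv x3 (by simp)]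
  simp only [horn, List.foldl_cons, List.foldl_nil]
  simp only [show ((12:Int) - 4 * (0)).toNat = 12 from rfl,
      show ((12:Int) - 4 * (0 + 1)).toNat = 8 from rfl,
      show ((12:Int) - 4 * (0 + 1 + 1)).toNat = 4 from rfl,
      show ((12:Int) - 4 * (0 + 1 + 1 + 1)).toNat = 0 from rfl]
  simp only [Int.shiftLeft_natCast_right, Int.shiftLeft_eq]
  norm_num
  ring

lemma piece8 (l : List Int) (hl : l.length = 2) (hr : ∀ x ∈ l, -128 ≤ x ∧ x ≤ 127) :
    ((PySem.List.enumerate l 0).map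
      (fun p => ((PySem.List.pyGet? (PySem.List.pyRange 128 256 1 ++ PySem.List.pyRange 0 128 1) (p.2 + 128)).getD 0)
        <<< (8 - 8 * p.1).toNat)).sum
    = horn 256 (fun x => x.emod 256) l := by
  rcases l with _ | ⟨x0, _ | ⟨x1, rest⟩⟩ <;>
    simp only [List.length_cons, List.length_nil] at hl <;> try omega
  have hrest : rest = [] := by
    have : rest.length = 0 := by omega
    simpa using this
  subst hrest
  have hv : ∀ x ∈ [x0, x1],
      ((PySem.List.pyGet? (PySem.List.pyRange 128 256 1 ++ PySem.List.pyRange 0 128 1) (x + 128)).getD 0) = x.emod 256 := by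
    intro x hx
    have := hr x hx
    exact zval_gen 128 256 x (by norm_num) (by norm_num) (by omega) (by omega)
  simp only [PySem.List.enumerate_cons, PySem.List.enumerate_nil, List.map_cons, List.map_nil,
    List.sum_cons, List.sum_nil]
  rw [hv x0 (by simp), hv x1 (by simp)]
  simp only [horn, List.foldl_cons, List.foldl_nil]
  simp only [show ((8:Int) - 8 * (0)).toNat = 8 from rfl,
      show ((8:Int) - 8 * (0 + 1)).toNat = 0 from rfl]
  simp only [Int.shiftLeft_natCast_right, Int.shiftLeft_eq]
  norm_num

lemma chunks_cast (n a b : Nat) :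
    PySem.Int.floordiv ((n:Int) + (a:Int)) (b:Int) = (((n + a) / b : Nat) : Int) := by
  rw [show ((n:Int) + a) = ((n + a : Nat) : Int) by push_cast; ring]
  exact_mod_cast PySem.Int.floordiv_natCast (n + a) b

lemma piece_len (v2 : List Int) (ipw k c : Nat) (hk : k < c) (hc : c * ipw ≤ v2.length) :
    ((v2.drop (k * ipw)).take ipw).length = ipw := by
  rw [List.length_take, List.length_drop]
  have h1 : (k + 1) * ipw ≤ c * ipw := Nat.mul_le_mul_right _ hk
  have h2 : (k + 1) * ipw = k * ipw + ipw := by ring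
  omega

lemma mem_pad (v : List Int) (Rlo Rhi : Int) (hlo : Rlo ≤ 0) (hhi : 0 ≤ Rhi)
    (hr : ∀ x ∈ v, Rlo ≤ x ∧ x ≤ Rhi) (r : Nat) :
    ∀ x ∈ v ++ List.replicate r (0:Int), Rlo ≤ x ∧ x ≤ Rhi := by
  intro x hx
  rcases List.mem_append.1 hx with h | h
  · exact hr x h
  · rw [List.eq_of_mem_replicate h]; exact ⟨hlo, hhi⟩

lemma c_mul_le (n ipw : Nat) :
    ((n + (ipw - 1)) / ipw) * ipw ≤ n + (ipw - 1) := Nat.div_mul_le_self _ _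

lemma A2 (v : List Int) (hn : 1 ≤ v.length) (hr : ∀ x ∈ v, -2 ≤ x ∧ x ≤ 1) :
    (PySem.List.pyRange 0 (PySem.Int.floordiv ((v.length:Int) + 7) 8) 1).foldl (fun acc i =>
      acc ++ [((PySem.List.enumerate
          (PySem.List.slice (v ++ List.replicate 7 (0:Int)) (some (i * 8)) (some ((i + 1) * 8))) 0).map
        (fun p => ((PySem.List.pyGet? ([2,3,0,1] : List Int) (p.2 + 2)).getD 0) <<< (14 - 2 * p.1).toNat)).sum]) []
    = wordsF 4 8 (v ++ List.replicate 7 0) ((v.length + 7) / 8) := by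
  have hch := chunks_cast v.length 7 8
  simp only [Nat.cast_ofNat] at hch
  have hrange : PySem.List.pyRange 0 (((v.length + 7) / 8 : Nat) : Int) 1
      = (List.range ((v.length + 7) / 8)).map (fun (k : Nat) => (0:Int) + (k:Int)) := by
    have ht : ((((v.length + 7) / 8 : Nat) : Int) - 0).toNat = (v.length + 7) / 8 := by omega
    rw [PySem.List.pyRange_one, ht]
  rw [hch, PySem.List.foldl_append_singleton_eq_map, List.nil_append, hrange, List.map_map]
  unfold wordsF
  apply List.map_congr_left
  intro k hk
  simp only [List.mem_range] at hk
  simp only [Function.comp]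
  have e1 : ((0:Int) + (k:Int)) * 8 = ((k * 8 : Nat) : Int) := by push_cast; ring
  have e2 : (((0:Int) + (k:Int)) + 1) * 8 = ((k * 8 + 8 : Nat) : Int) := by push_cast; ring
  rw [e1, e2, PySem.List.slice_natCast]
  have e3 : k * 8 + 8 - k * 8 = 8 := by omega
  rw [e3]
  apply piece2
  · apply piece_len _ 8 k ((v.length + 7)/8) hk
    have h1 : (v ++ List.replicate 7 (0:Int)).length = v.length + 7 := by simp
    have h2 := c_mul_le v.length 8
    omega
  · intro x hx
    exact mem_pad v (-2) 1 (by norm_num) (by norm_num) hr 7 x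
      (List.mem_of_mem_drop (List.mem_of_mem_take hx))

lemma A4 (v : List Int) (hn : 1 ≤ v.length) (hr : ∀ x ∈ v, -8 ≤ x ∧ x ≤ 7) :
    (PySem.List.pyRange 0 (PySem.Int.floordiv ((v.length:Int) + 3) 4) 1).foldl (fun acc i =>
      acc ++ [((PySem.List.enumerate
          (PySem.List.slice (v ++ List.replicate 3 (0:Int)) (some (i * 4)) (some ((i + 1) * 4))) 0).map
        (fun p => ((PySem.List.pyGet? (PySem.List.pyRange 8 16 1 ++ PySem.List.pyRange 0 8 1) (p.2 + 8)).getD 0)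
          <<< (12 - 4 * p.1).toNat)).sum]) []
    = wordsF 16 4 (v ++ List.replicate 3 0) ((v.length + 3) / 4) := by
  have hch := chunks_cast v.length 3 4
  simp only [Nat.cast_ofNat] at hch
  have hrange : PySem.List.pyRange 0 (((v.length + 3) / 4 : Nat) : Int) 1
      = (List.range ((v.length + 3) / 4)).map (fun (k : Nat) => (0:Int) + (k:Int)) := by
    have ht : ((((v.length + 3) / 4 : Nat) : Int) - 0).toNat = (v.length + 3) / 4 := by omega
    rw [PySem.List.pyRange_one, ht]
  rw [hch, PySem.List.foldl_append_singleton_eq_map, List.nil_append, hrange, List.map_map]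
  unfold wordsF
  apply List.map_congr_left
  intro k hk
  simp only [List.mem_range] at hk
  simp only [Function.comp]
  have e1 : ((0:Int) + (k:Int)) * 4 = ((k * 4 : Nat) : Int) := by push_cast; ring
  have e2 : (((0:Int) + (k:Int)) + 1) * 4 = ((k * 4 + 4 : Nat) : Int) := by push_cast; ring
  rw [e1, e2, PySem.List.slice_natCast]
  have e3 : k * 4 + 4 - k * 4 = 4 := by omega
  rw [e3]
  apply piece4
  · apply piece_len _ 4 k ((v.length + 3)/4) hk
    have h1 : (v ++ List.replicate 3 (0:Int)).length = v.length + 3 := by simp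
    have h2 := c_mul_le v.length 4
    omega
  · intro x hx
    exact mem_pad v (-8) 7 (by norm_num) (by norm_num) hr 3 x
      (List.mem_of_mem_drop (List.mem_of_mem_take hx))

lemma A8 (v : List Int) (hn : 1 ≤ v.length) (hr : ∀ x ∈ v, -128 ≤ x ∧ x ≤ 127) :
    (PySem.List.pyRange 0 (PySem.Int.floordiv ((v.length:Int) + 1) 2) 1).foldl (fun acc i =>
      acc ++ [((PySem.List.enumerate
          (PySem.List.slice (v ++ [(0:Int)]) (some (i * 2)) (some ((i + 1) * 2))) 0).map
        (fun p => ((PySem.List.pyGet? (PySem.List.pyRange 128 256 1 ++ PySem.List.pyRange 0 128 1) (p.2 + 128)).getD 0)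
          <<< (8 - 8 * p.1).toNat)).sum]) []
    = wordsF 256 2 (v ++ List.replicate 1 0) ((v.length + 1) / 2) := by
  have hch := chunks_cast v.length 1 2
  simp only [Nat.cast_one, Nat.cast_ofNat] at hch
  have hrange : PySem.List.pyRange 0 (((v.length + 1) / 2 : Nat) : Int) 1
      = (List.range ((v.length + 1) / 2)).map (fun (k : Nat) => (0:Int) + (k:Int)) := by
    have ht : ((((v.length + 1) / 2 : Nat) : Int) - 0).toNat = (v.length + 1) / 2 := by omega
    rw [PySem.List.pyRange_one, ht]
  have hone : (v ++ [(0:Int)]) = v ++ List.replicate 1 (0:Int) := by simp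
  rw [hone, hch, PySem.List.foldl_append_singleton_eq_map, List.nil_append, hrange, List.map_map]
  unfold wordsF
  apply List.map_congr_left
  intro k hk
  simp only [List.mem_range] at hk
  simp only [Function.comp]
  have e1 : ((0:Int) + (k:Int)) * 2 = ((k * 2 : Nat) : Int) := by push_cast; ring
  have e2 : (((0:Int) + (k:Int)) + 1) * 2 = ((k * 2 + 2 : Nat) : Int) := by push_cast; ring
  rw [e1, e2, PySem.List.slice_natCast]
  have e3 : k * 2 + 2 - k * 2 = 2 := by omega
  rw [e3]
  apply piece8
  · apply piece_len _ 2 k ((v.length + 1)/2) hk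
    have h1 : (v ++ List.replicate 1 (0:Int)).length = v.length + 1 := by simp
    have h2 := c_mul_le v.length 2
    omega
  · intro x hx
    exact mem_pad v (-128) 127 (by norm_num) (by norm_num) hr 1 x
      (List.mem_of_mem_drop (List.mem_of_mem_take hx))

lemma packAlt_eq (cs m : Int) (ipw : Nat) (hipw : 0 < ipw)
    (hfd : PySem.Int.floordiv 16 cs = (ipw : Int))
    (hbase : (1 : Int) <<< cs.toNat = m)
    (hm : 2 ≤ m) (hM : m ^ ipw = 65536)
    (v : List Int) :
    packAlt cs v (v.length : Int)
      = (wordsF m ipw (v ++ List.replicate (ipw - 1) 0) ((v.length + (ipw - 1)) / ipw), cs) := by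
  unfold packAlt
  simp only [hfd, hbase]
  have hpad : ((ipw : Int) - 1).toNat = ipw - 1 := by omega
  rw [hpad]
  have hcast : (v.length : Int) + (ipw : Int) - 1 = (v.length : Int) + ((ipw - 1 : Nat) : Int) := by
    omega
  rw [hcast, chunks_cast v.length (ipw - 1) ipw]
  set n := v.length with hn'
  set c := (n + (ipw - 1)) / ipw with hc
  set v2 := v ++ List.replicate (ipw - 1) (0:Int) with hv2
  have hlenv2 : v2.length = n + (ipw - 1) := by simp [hv2]; omega
  have hcmul : c * ipw ≤ v2.length := by rw [hlenv2, hc]; exact c_mul_le n ipw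
  -- the slice is take (c * ipw)
  have hsl : ((c : Int) * (ipw : Int)) = ((c * ipw : Nat) : Int) := by push_cast; ring
  rw [hsl, PySem.List.slice_to v2 (by positivity), Int.toNat_natCast]
  -- mod → emod
  have hmpos : (0:Int) < m := by omega
  simp only [PySem.Int.mod_eq_emod_of_pos hmpos]
  -- total = word-level Horner
  have htot : List.foldl (fun t x => t * m + x % m) 0 (List.take (c * ipw) v2)
      = List.foldl (fun t w => t * m ^ ipw + w) 0 (wordsF m ipw v2 c) :=
    core_chunks m (by omega) ipw v2 c hcmul
  rw [htot]
  -- word bounds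
  have hb : ∀ w ∈ wordsF m ipw v2 c, 0 ≤ w ∧ w < 65536 := by
    intro w hw
    simp only [wordsF, List.mem_map, List.mem_range] at hw
    obtain ⟨j, hj, rfl⟩ := hw
    have hbd := horn_bounds m hmpos (fun x => x.emod m) ((v2.drop (j * ipw)).take ipw)
      (fun x _ => ⟨Int.emod_nonneg x (by omega), Int.emod_lt_of_pos x hmpos⟩)
    refine ⟨hbd.1, lt_of_lt_of_le hbd.2 ?_⟩
    calc m ^ ((v2.drop (j * ipw)).take ipw).length
        ≤ m ^ ipw := pow_le_pow_right₀ (by omega) (by simp [List.length_take])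
      _ = 65536 := hM
  have hwlen : (wordsF m ipw v2 c).length = c := by simp [wordsF]
  -- the retVal map
  have hrange : PySem.List.pyRange 0 ((c : Nat) : Int) 1
      = (List.range c).map (fun (k : Nat) => (0:Int) + (k:Int)) := by
    have ht : (((c : Nat) : Int) - 0).toNat = c := by omega
    rw [PySem.List.pyRange_one, ht]
  rw [hrange, List.map_map]
  unfold wordsF
  refine Prod.ext ?_ rfl
  show List.map _ _ = _
  apply List.map_congr_left
  intro k hk
  simp only [List.mem_range] at hk
  simp only [Function.comp]
  -- the shift divisor is 65536 ^ (c - 1 - k)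
  have hexp : (16 * ((c : Int) - 1 - ((0:Int) + (k : Int)))).toNat = 16 * (c - 1 - k) := by omega
  rw [hexp]
  have hshift : ((1 : Int) <<< (16 * (c - 1 - k) : Nat)) = (65536 : Int) ^ (c - 1 - k) := by
    rw [Int.shiftLeft_eq, one_mul, pow_mul]
    norm_num
  rw [hshift]
  have hdpos : (0:Int) < (65536 : Int) ^ (c - 1 - k) := by positivity
  rw [PySem.Int.floordiv_eq_ediv_of_pos hdpos, PySem.Int.mod_eq_emod_of_pos (by norm_num)]
  rw [hM]
  have hext := horn_extract 65536 (by norm_num) (wordsF m ipw v2 c) hb k (by omega)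
  rw [hwlen] at hext
  have hext' : List.foldl (fun t w => t * 65536 + w) 0
        (List.map (fun j => horn m (fun x => x.emod m) (List.take ipw (List.drop (j * ipw) v2)))
          (List.range c)) / 65536 ^ (c - 1 - k) % 65536
      = (wordsF m ipw v2 c).getD k 0 := hext
  rw [hext']
  simp [wordsF, List.getD_eq_getElem?_getD, hk]

-- ===== VERDICT (by name: the statement is the Claim_ definition above) =====
theorem packDevice_py_spec : Claim_equal_packDevice_py := by
  intro v _hdom hpre
  obtain ⟨hne, hb⟩ := hpre
  have hn : 1 ≤ v.length := List.length_pos_iff.mpr hne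
  unfold Spec_packDevice_py packDevice_py packDevice_py_alt
  rcases h1 : PySem.List.min? v (fun x => x) with _ | lo
  · rw [PySem.List.min?_eq_none_iff] at h1
  rcases h2 : PySem.List.max? v (fun x => x) with _ | hi
  · rw [PySem.List.max?_eq_none_iff] at h2
  have hlo_mem : lo ∈ v := PySem.List.min?_mem h1
  have hhi_mem : hi ∈ v := PySem.List.max?_mem h2
  have hlo_min : ∀ y ∈ v, lo ≤ y := PySem.List.min?_isMin h1
  have hhi_max : ∀ y ∈ v, y ≤ hi := PySem.List.max?_isMax h2
  simp only []
  by_cases hc2 : lo ≥ -2 ∧ hi ≤ 1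
  · have hr2 : ∀ x ∈ v, -2 ≤ x ∧ x ≤ 1 := fun x hx =>
      ⟨by have := hlo_min x hx; omega, by have := hhi_max x hx; omega⟩
    rw [if_pos hc2, if_pos hc2]
    simp only [beq_self_eq_true, if_true]
    rw [packAlt_eq 2 4 8 (by norm_num) (by decide) (by decide) (by norm_num) (by norm_num) v]
    rw [A2 v hn hr2]
  · by_cases hc4 : lo ≥ -8 ∧ hi ≤ 7
    · have hr4 : ∀ x ∈ v, -8 ≤ x ∧ x ≤ 7 := fun x hx =>
        ⟨by have := hlo_min x hx; omega, by have := hhi_max x hx; omega⟩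
      rw [if_neg hc2, if_neg hc2, if_pos hc4, if_pos hc4]
      simp only [show ((4:Int) == 2) = false by decide, Bool.false_eq_true, if_false,
        beq_self_eq_true, if_true]
      rw [packAlt_eq 4 16 4 (by norm_num) (by decide) (by decide) (by norm_num) (by norm_num) v]
      rw [A4 v hn hr4]
    · have hc8 : lo ≥ -128 ∧ hi ≤ 127 :=
        ⟨by have := hb lo hlo_mem; omega, by have := hb hi hhi_mem; omega⟩
      have hr8 : ∀ x ∈ v, -128 ≤ x ∧ x ≤ 127 := hb
      rw [if_neg hc2, if_neg hc2, if_neg hc4, if_neg hc4, if_pos hc8, if_pos hc8]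
      simp only [show ((8:Int) == 2) = false by decide, show ((8:Int) == 4) = false by decide,
        Bool.false_eq_true, if_false]
      rw [packAlt_eq 8 256 2 (by norm_num) (by decide) (by decide) (by norm_num) (by norm_num) v]
      rw [A8 v hn hr8]
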